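-- pv_equiv track=rewrite | github.com/nadimra/competitive-programming | book/oneAway.py | getCharacterOccurances
-- ===== SOURCE A (Python) =====
-- def getCharacterOccurances(characterMap,str1,add):
--     for c in str1:
--         occurances = characterMap.get(c,0)
--         if add:
--             characterMap[c] = occurances + 1
--         else:
--             characterMap[c] = occurances - 1
--     return characterMap
-- ===== SOURCE B (Python) =====
-- def getCharacterOccurances(characterMap, str1, add):
--     sign = 1 if add else -1
--     counts = {}
--     for c in str1:
--         counts[c] = counts.get(c, 0) + 1
--     for k in characterMap:
--         characterMap[k] += sign * counts.get(k, 0)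
--     for c, n in counts.items():
--         if c not in characterMap:
--             characterMap[c] = sign * n
--     return characterMap
-- ===== Notes on version B (the rewrite author's own statement) =====
-- stated objective: alternative
-- what changed: B replaces A's one-dict-update-per-character loop by a three-stage decomposition: build a frequency table of str1, bump every existing key of characterMap by sign*count in one pass over the map, then append the remaining new characters with sign*count in first-occurrence order; Pre_ excludes association lists with duplicate keys, which denote no Python dict (duplicates collapse before either function is called).
import Mathlib
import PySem

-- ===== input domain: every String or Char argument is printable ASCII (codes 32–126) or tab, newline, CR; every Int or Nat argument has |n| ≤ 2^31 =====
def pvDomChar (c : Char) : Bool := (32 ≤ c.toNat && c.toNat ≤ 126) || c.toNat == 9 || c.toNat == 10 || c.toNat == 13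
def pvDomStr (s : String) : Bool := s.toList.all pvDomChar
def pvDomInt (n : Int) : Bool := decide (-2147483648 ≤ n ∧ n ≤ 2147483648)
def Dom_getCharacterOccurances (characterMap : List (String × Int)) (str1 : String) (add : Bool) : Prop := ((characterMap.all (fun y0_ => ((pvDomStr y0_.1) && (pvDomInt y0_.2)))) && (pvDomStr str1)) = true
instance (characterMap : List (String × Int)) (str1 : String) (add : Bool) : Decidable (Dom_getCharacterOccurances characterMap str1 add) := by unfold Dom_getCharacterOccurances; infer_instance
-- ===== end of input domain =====

-- B decomposes A's per-character dict-update loop into three stages: count str1's characters,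
-- bump the existing keys of characterMap in one pass over the map, append the new characters
-- (alternative decomposition, same cost). The equivalence is about the RETURN value; Python A
-- mutates characterMap in place (B performs the same mutation).

-- ===== PORT A =====
def getCharacterOccurances (characterMap : List (String × Int)) (str1 : String) (add : Bool) : List (String × Int) :=
  ((str1.toList.map (fun ch => String.mk [ch])).foldl
    (fun d c =>
      if add then d.insert c (d.getD c 0 + 1) else d.insert c (d.getD c 0 - 1))
    (PySem.Dict.ofList characterMap)).items

-- ===== PORT B =====
def getCharacterOccurances_alt (characterMap : List (String × Int)) (str1 : String) (add : Bool) : List (String × Int) :=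
  -- sign = 1 if add else -1
  let sign : Int := if add then 1 else -1
  -- counts = {}; for c in str1: counts[c] = counts.get(c, 0) + 1
  let counts := (str1.toList.map (fun ch => String.mk [ch])).foldl
      (fun d c => d.insert c (d.getD c 0 + 1)) PySem.Dict.empty
  -- for k in characterMap: characterMap[k] += sign * counts.get(k, 0)
  -- (value update of each existing key in place; exact as a map over the association list
  --  because the keys of a Python dict are distinct — Pre_)
  let updated := characterMap.map (fun p => (p.1, p.2 + sign * counts.getD p.1 0))
  -- for c, n in counts.items():
  --     if c not in characterMap: characterMap[c] = sign * n
  counts.items.foldl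
    (fun acc p => if acc.any (fun q => q.1 == p.1) then acc else acc ++ [(p.1, sign * p.2)])
    updated

-- ===== PRECONDITION & SPEC =====
-- Pre_ excludes association lists with duplicate keys: they denote no Python dict (a dict's
-- keys are distinct and duplicates collapse before the function is even called), so the
-- list-level value there is an artefact of the representation.
def Pre_getCharacterOccurances (characterMap : List (String × Int)) (str1 : String) (add : Bool) : Prop :=
  (characterMap.map Prod.fst).Nodup
instance (characterMap : List (String × Int)) (str1 : String) (add : Bool) : Decidable (Pre_getCharacterOccurances characterMap str1 add) := by unfold Pre_getCharacterOccurances; infer_instance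

def pvWitness_getCharacterOccurances : (List (String × Int)) × String × Bool := ([("a", 2), ("b", -1)], "abca", true)

def Spec_getCharacterOccurances (characterMap : List (String × Int)) (str1 : String) (add : Bool) (out : List (String × Int)) : Prop := out = getCharacterOccurances_alt characterMap str1 add
instance (characterMap : List (String × Int)) (str1 : String) (add : Bool) (out : List (String × Int)) : Decidable (Spec_getCharacterOccurances characterMap str1 add out) := by unfold Spec_getCharacterOccurances; infer_instance

-- ===== CLAIM (what is proved, stated in full; the proofs are below) =====
def Claim_equal_getCharacterOccurances : Prop := ∀ (characterMap : List (String × Int)) (str1 : String) (add : Bool), Dom_getCharacterOccurances characterMap str1 add → Pre_getCharacterOccurances characterMap str1 add → Spec_getCharacterOccurances characterMap str1 add (getCharacterOccurances characterMap str1 add)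

-- ===== LEMMAS AND PROOFS =====

-- fold applying, for each key k of K, the signed update `d[k] = d.get(k,0) + s*cnt(k)`
def applyK (s : Int) (d : PySem.Dict String Int) (K : List String) (cnt : String → Int) : PySem.Dict String Int :=
  K.foldl (fun d k => d.insert k (d.getD k 0 + s * cnt k)) d

theorem applyK_cons (s : Int) (d : PySem.Dict String Int) (k : String) (K : List String)
    (cnt : String → Int) :
    applyK s d (k :: K) cnt = applyK s (d.insert k (d.getD k 0 + s * cnt k)) K cnt := rfl

theorem applyK_congr (s : Int) (d : PySem.Dict String Int) (K : List String)
    (cnt1 cnt2 : String → Int) (h : ∀ k ∈ K, cnt1 k = cnt2 k) :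
    applyK s d K cnt1 = applyK s d K cnt2 := by
  induction K generalizing d with
  | nil => rfl
  | cons k rest ih =>
    rw [applyK_cons, applyK_cons, h k (by simp)]
    exact ih _ (fun k hk => h k (by simp [hk]))

theorem getD_applyK_not_mem (s : Int) (d : PySem.Dict String Int) (K : List String)
    (cnt : String → Int) (c : String) (h : c ∉ K) :
    (applyK s d K cnt).getD c 0 = d.getD c 0 := by
  induction K generalizing d with
  | nil => rfl
  | cons k rest ih =>
    rw [applyK_cons, ih _ (fun hc => h (by simp [hc]))]
    exact PySem.Dict.getD_insert_of_ne _ _ _ (fun hck => h (by simp [hck]))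

theorem insert_comm_of_contains (d : PySem.Dict String Int) (c k : String) (X V : Int)
    (hc : d.contains c = true) (hkc : k ≠ c) :
    (d.insert c X).insert k V = (d.insert k V).insert c X := by
  apply PySem.Dict.ext
  have hkc' : (k == c) = false := by simp [hkc]
  have hck' : (c == k) = false := by simp; exact fun h => hkc h.symm
  cases hk : d.contains k with
  | false =>
    rw [PySem.Dict.items_insert (d.insert c X) k V,
        PySem.Dict.items_insert (d.insert k V) c X,
        PySem.Dict.items_insert d c X, PySem.Dict.items_insert d k V]
    simp only [PySem.Dict.contains_insert, hkc', hck', hc, hk, Bool.false_or, Bool.or_false,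
      if_true, if_false, List.map_append, List.map_cons, List.map_nil,
      Bool.false_eq_true]
  | true =>
    rw [PySem.Dict.items_insert (d.insert c X) k V,
        PySem.Dict.items_insert (d.insert k V) c X,
        PySem.Dict.items_insert d c X, PySem.Dict.items_insert d k V]
    simp only [PySem.Dict.contains_insert, hkc', hck', hc, hk, Bool.false_or,
      if_true, List.map_map]
    apply List.map_congr_left
    intro p _
    by_cases hpc : p.1 = c
    · have h1 : (p.1 == c) = true := by simp [hpc]
      have h2 : (p.1 == k) = false := by
        simp only [hpc, beq_eq_false_iff_ne, ne_eq]
        exact fun h => hkc h.symm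
      simp [Function.comp, h1, h2, hck']
    · have h1 : (p.1 == c) = false := by simp [hpc]
      by_cases hpk : p.1 = k
      · have h2 : (p.1 == k) = true := by simp [hpk]
        simp [Function.comp, h1, h2, hkc']
      · have h2 : (p.1 == k) = false := by simp [hpk]
        simp [Function.comp, h1, h2]

theorem applyK_insert_comm (s : Int) (d : PySem.Dict String Int) (K : List String)
    (cnt : String → Int) (c : String) (X : Int)
    (hc : d.contains c = true) (h : c ∉ K) :
    applyK s (d.insert c X) K cnt = (applyK s d K cnt).insert c X := by
  induction K generalizing d with
  | nil => rfl
  | cons k rest ih =>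
    have hkc : k ≠ c := by rintro rfl; simp at h
    rw [applyK_cons, applyK_cons, PySem.Dict.getD_insert_of_ne _ _ _ hkc,
        insert_comm_of_contains d c k X _ hc hkc]
    exact ih (d.insert k _) (by simp [PySem.Dict.contains_insert, hc])
      (fun hcr => h (List.mem_cons_of_mem _ hcr))

theorem applyK_bump (s : Int) (K : List String) (d : PySem.Dict String Int)
    (cnt : String → Int) (c : String) (hnd : K.Nodup) (hc : c ∈ K) :
    applyK s d K (fun k => cnt k + (if k = c then 1 else 0))
      = (applyK s d K cnt).insert c ((applyK s d K cnt).getD c 0 + s) := by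
  induction K generalizing d with
  | nil => cases hc
  | cons k rest ih =>
    by_cases hkc : k = c
    · subst hkc
      have hkr : k ∉ rest := (List.nodup_cons.mp hnd).1
      rw [applyK_cons, applyK_cons, if_pos rfl,
          applyK_congr s _ rest (fun k' => cnt k' + (if k' = k then 1 else 0)) cnt
            (fun k' hk' => by
              have hne : k' ≠ k := fun h => hkr (h ▸ hk')
              simp [hne])]
      have hins : d.insert k (d.getD k 0 + s * (cnt k + 1))
          = (d.insert k (d.getD k 0 + s * cnt k)).insert k
              ((d.insert k (d.getD k 0 + s * cnt k)).getD k 0 + s) := by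
        rw [PySem.Dict.insert_insert_self, PySem.Dict.getD_insert_self]
        ring_nf
      rw [hins, applyK_insert_comm s _ rest cnt k _
            (by simp [PySem.Dict.contains_insert]) hkr,
          getD_applyK_not_mem s _ rest cnt k hkr, PySem.Dict.getD_insert_self]
    · have hcr : c ∈ rest := by
        rcases List.mem_cons.mp hc with h | h
        · exact absurd h.symm hkc
        · exact h
      rw [applyK_cons, applyK_cons, if_neg hkc, add_zero]
      exact ih _ (List.nodup_cons.mp hnd).2 hcr

theorem foldl_step_eq_applyK (s : Int) (l : List String) (d : PySem.Dict String Int) :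
    l.foldl (fun d c => d.insert c (d.getD c 0 + s)) d
      = applyK s d (PySem.Set.ofList l) (fun k => (List.count k l : Int)) := by
  induction l using List.reverseRecOn generalizing d with
  | nil => rfl
  | append_singleton l c ih =>
    rw [List.foldl_append, List.foldl_cons, List.foldl_nil, ih,
        PySem.Set.ofList_append_singleton]
    by_cases hc : c ∈ l
    · rw [PySem.Set.add_of_mem ((PySem.Set.mem_ofList l c).mpr hc)]
      have hfun : (fun k => ((List.count k (l ++ [c]) : Nat) : Int))
          = fun k => (List.count k l : Int) + (if k = c then 1 else 0) := by
        funext k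
        by_cases hkc : k = c
        · subst hkc; simp [List.count_append, List.count_singleton]
        · have : (c == k) = false := by
            simp only [beq_eq_false_iff_ne, ne_eq]
            exact fun h => hkc h.symm
          simp [List.count_append, List.count_singleton, this, hkc]
      rw [hfun]
      exact (applyK_bump s _ d _ c (PySem.Set.nodup_ofList l)
        ((PySem.Set.mem_ofList l c).mpr hc)).symm
    · rw [PySem.Set.add_of_not_mem (fun h => hc ((PySem.Set.mem_ofList l c).mp h))]
      have hsplit : applyK s d (PySem.Set.ofList l ++ [c])
            (fun k => ((List.count k (l ++ [c]) : Nat) : Int))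
          = (applyK s d (PySem.Set.ofList l)
              (fun k => ((List.count k (l ++ [c]) : Nat) : Int))).insert c
              ((applyK s d (PySem.Set.ofList l)
                (fun k => ((List.count k (l ++ [c]) : Nat) : Int))).getD c 0
                + s * ((List.count c (l ++ [c]) : Nat) : Int)) := by
        simp [applyK, List.foldl_append]
      have hcount : ((List.count c (l ++ [c]) : Nat) : Int) = 1 := by
        simp [List.count_append, List.count_eq_zero_of_not_mem hc]
      have hcongr : applyK s d (PySem.Set.ofList l)
            (fun k => ((List.count k (l ++ [c]) : Nat) : Int))
          = applyK s d (PySem.Set.ofList l) (fun k => (List.count k l : Int)) :=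
        applyK_congr s d _ _ _ (fun k hk => by
          have hkc : k ≠ c := fun he => hc (he ▸ (PySem.Set.mem_ofList l k).mp hk)
          have : (c == k) = false := by
            simp only [beq_eq_false_iff_ne, ne_eq]
            exact fun h => hkc h.symm
          simp [List.count_append, List.count_singleton, this])
      rw [hsplit, hcount, hcongr, mul_one]

-- items of the applyK fold: existing keys updated in place, new keys of K appended in order
theorem items_applyK (s : Int) (K : List String) (cnt : String → Int)
    (d : PySem.Dict String Int) (hK : K.Nodup) (hd : d.keys.Nodup) :
    (applyK s d K cnt).items
      = d.items.map (fun p => if p.1 ∈ K then (p.1, p.2 + s * cnt p.1) else p)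
        ++ (K.filter (fun k => !d.contains k)).map (fun k => (k, s * cnt k)) := by
  induction K generalizing d with
  | nil => simp [applyK]
  | cons k K' ih =>
    obtain ⟨hk', hnd'⟩ := List.nodup_cons.mp hK
    rw [applyK_cons, ih _ hnd' (PySem.Dict.nodup_keys_insert _ _ _ hd)]
    have hfilter : ∀ v : Int, K'.filter (fun x => !(d.insert k v).contains x)
        = K'.filter (fun x => !d.contains x) := by
      intro v
      apply List.filter_congr
      intro x hx
      have hxk : (x == k) = false := by
        simp only [beq_eq_false_iff_ne, ne_eq]; rintro rfl; exact hk' hx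
      simp [PySem.Dict.contains_insert, hxk]
    cases hc : d.contains k with
    | true =>
      rw [PySem.Dict.items_insert_of_contains _ _ hc, List.map_map, hfilter,
          List.filter_cons_of_neg (by simp [hc])]
      congr 1
      apply List.map_congr_left
      intro p hp
      by_cases hpk : p.1 = k
      · have hgd : d.getD k 0 = p.2 := by
          have hmem : (p.1, p.2) ∈ d.items := by simpa using hp
          exact PySem.Dict.getD_of_mem_items _ (hpk ▸ hmem) hd 0
        simp [Function.comp, hpk, hgd, List.mem_cons, hk']
      · have hb : (p.1 == k) = false := by simp [hpk]
        simp only [Function.comp, hb, Bool.false_eq_true, if_false, List.mem_cons, hpk, false_or]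
    | false =>
      rw [PySem.Dict.items_insert_of_not_contains _ _ hc,
          PySem.Dict.getD_of_not_contains _ _ hc, hfilter,
          List.filter_cons_of_pos (by simp [hc]), List.map_append, List.map_cons,
          List.map_cons, List.map_nil]
      have hknotin : ∀ p ∈ d.items, p.1 ≠ k := by
        intro p hp hpk
        have hkk : k ∈ d.keys := hpk ▸ List.mem_map_of_mem hp
        rw [← PySem.Dict.contains_iff_mem_keys] at hkk
        simp [hc] at hkk
      have h1 : (List.map (fun p => if p.1 ∈ K' then (p.1, p.2 + s * cnt p.1) else p) d.items)
          = List.map (fun p => if p.1 ∈ k :: K' then (p.1, p.2 + s * cnt p.1) else p) d.items := by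
        apply List.map_congr_left
        intro p hp
        simp [List.mem_cons, hknotin p hp]
      rw [h1]
      simp [List.mem_cons, hk', List.append_assoc]
-- the second B loop appends exactly the keys of K absent from acc, in K's order
theorem pass2_fold (s : Int) (K : List String) (f : String → Int)
    (hK : K.Nodup) (acc : List (String × Int)) :
    (K.map (fun k => (k, f k))).foldl
        (fun acc p => if acc.any (fun q => q.1 == p.1) then acc else acc ++ [(p.1, s * p.2)]) acc
      = acc ++ (K.filter (fun k => !acc.any (fun q => q.1 == k))).map (fun k => (k, s * f k)) := by
  induction K generalizing acc with
  | nil => simp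
  | cons k K' ih =>
    obtain ⟨hk', hnd'⟩ := List.nodup_cons.mp hK
    rw [List.map_cons, List.foldl_cons]
    cases hc : acc.any (fun q => q.1 == k) with
    | true =>
      simp only [if_true]
      rw [ih hnd' acc, List.filter_cons_of_neg (by simp [hc])]
    | false =>
      simp only [Bool.false_eq_true, if_false]
      rw [ih hnd' (acc ++ [(k, s * f k)]), List.filter_cons_of_pos (by simp [hc])]
      have hfilter : K'.filter (fun x => !(acc ++ [(k, s * f k)]).any (fun q => q.1 == x))
          = K'.filter (fun x => !acc.any (fun q => q.1 == x)) := by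
        apply List.filter_congr
        intro x hx
        have hkx : (k == x) = false := by
          simp only [beq_eq_false_iff_ne, ne_eq]; rintro rfl; exact hk' hx
        simp [List.any_append, hkx]
      rw [hfilter]
      simp [List.append_assoc]
theorem items_ofList_nodup (cm : List (String × Int)) (hnd : (cm.map Prod.fst).Nodup) :
    (PySem.Dict.ofList cm).items = cm := by
  have h := PySem.Dict.items_foldl_insert_fresh (l := cm) (k := Prod.fst) (v := Prod.snd)
    (d := (PySem.Dict.empty : PySem.Dict String Int)) (by simp [PySem.Dict.contains_empty]) hnd
  simpa [PySem.Dict.ofList] using h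
theorem contains_ofList_eq_any (cm : List (String × Int)) (k : String) :
    (PySem.Dict.ofList cm).contains k = cm.any (fun p => p.1 == k) := by
  rw [PySem.Dict.contains_eq_decide_mem_keys,
      show (PySem.Dict.ofList cm) = cm.foldl (fun d p => d.insert p.1 p.2) PySem.Dict.empty from rfl,
      PySem.Dict.keys_foldl_insert_key (key := Prod.fst) (f := fun d p => p.2),
      Bool.eq_iff_iff]
  simp only [decide_eq_true_eq, List.any_eq_true, PySem.Set.mem_update,
    PySem.Dict.keys_empty, List.mem_map, List.not_mem_nil, false_or, beq_iff_eq]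
theorem main_eq (s : Int) (cm : List (String × Int)) (l : List String)
    (hnd : (cm.map Prod.fst).Nodup) :
    (l.foldl (fun d c => d.insert c (d.getD c 0 + s)) (PySem.Dict.ofList cm)).items
      = ((PySem.Set.ofList l).map (fun k => (k, (List.count k l : Int)))).foldl
          (fun acc p => if acc.any (fun q => q.1 == p.1) then acc else acc ++ [(p.1, s * p.2)])
          (cm.map (fun p => (p.1, p.2 + s * (List.count p.1 l : Int)))) := by
  rw [foldl_step_eq_applyK,
      items_applyK s _ _ _ (PySem.Set.nodup_ofList l) (PySem.Dict.nodup_keys_ofList cm),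
      pass2_fold s _ _ (PySem.Set.nodup_ofList l), items_ofList_nodup cm hnd]
  congr 1
  · apply List.map_congr_left
    intro p _
    by_cases hp : p.1 ∈ PySem.Set.ofList l
    · simp [hp]
    · have hcount : List.count p.1 l = 0 :=
        List.count_eq_zero_of_not_mem (fun h => hp ((PySem.Set.mem_ofList l p.1).mpr h))
      simp [hp, hcount]
  · congr 1
    apply List.filter_congr
    intro x _
    rw [contains_ofList_eq_any]
    have hany : (cm.map (fun p => (p.1, p.2 + s * (List.count p.1 l : Int)))).any
        (fun q => q.1 == x) = cm.any (fun p => p.1 == x) := by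
      rw [List.any_map]
      rfl
    rw [hany]
theorem getCharacterOccurances_eq (characterMap : List (String × Int)) (str1 : String)
    (add : Bool) (hnd : (characterMap.map Prod.fst).Nodup) :
    getCharacterOccurances characterMap str1 add
      = getCharacterOccurances_alt characterMap str1 add := by
  unfold getCharacterOccurances getCharacterOccurances_alt
  simp only [PySem.Dict.foldl_insert_getD_add_one_eq_counter, PySem.Dict.items_counter,
    PySem.Dict.getD_counter]
  cases add with
  | true =>
    simp only [if_true]
    exact main_eq 1 characterMap _ hnd
  | false =>
    simp only [Bool.false_eq_true, if_false]
    rw [show (fun (d : PySem.Dict String Int) (c : String) => d.insert c (d.getD c 0 - 1))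
          = (fun (d : PySem.Dict String Int) (c : String) => d.insert c (d.getD c 0 + (-1))) by
        funext d c; ring_nf]
    exact main_eq (-1) characterMap _ hnd
-- ===== VERDICT (by name: the statement is the Claim_ definition above) =====
theorem getCharacterOccurances_spec : Claim_equal_getCharacterOccurances := by
  intro characterMap str1 add _ hpre
  exact getCharacterOccurances_eq characterMap str1 add hpre
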